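-- pv_equiv track=rewrite | github.com/TayPark/coding-test-fry | programmers/43164.py | solution
-- ===== SOURCE A (Python) =====
-- def solution(tickets):
--     routes = {}
--
--     for depart, arrival in tickets:
--         if depart in routes.keys():
--             routes[depart].append(arrival)
--         else:
--             routes[depart] = [arrival]
--
--     for route in routes:
--         routes[route].sort(reverse=True)
--
--     stack = ['ICN']
--     path = []
--
--     while stack:
--         top = stack[-1]
--         if top in routes and routes[top]:   # 출발-도착 목록에 있으면서 경로가 비어있지 않을 경우
--             stack.append(routes[top].pop())
--         else:
--             path.append(stack.pop())
--
--     return path[::-1]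
-- ===== SOURCE B (Python) =====
-- def solution(tickets):
--     routes = {}
--     for depart, arrival in tickets:
--         routes[depart] = routes.get(depart, []) + [arrival]
--     for k in routes:
--         routes[k].sort()
--     path = []
--
--     def visit(node):
--         while routes.get(node):
--             visit(routes[node].pop(0))
--         path.append(node)
--
--     visit('ICN')
--     return path[::-1]
-- ===== Notes on version B (the rewrite author's own statement) =====
-- stated objective: alternative
-- what changed: The explicit stack machine is replaced by the natural recursive Hierholzer: adjacency lists are sorted ascending and popped from the front, a recursive visit() appends each node post-order and the path is reversed at the end.
import Mathlib
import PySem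

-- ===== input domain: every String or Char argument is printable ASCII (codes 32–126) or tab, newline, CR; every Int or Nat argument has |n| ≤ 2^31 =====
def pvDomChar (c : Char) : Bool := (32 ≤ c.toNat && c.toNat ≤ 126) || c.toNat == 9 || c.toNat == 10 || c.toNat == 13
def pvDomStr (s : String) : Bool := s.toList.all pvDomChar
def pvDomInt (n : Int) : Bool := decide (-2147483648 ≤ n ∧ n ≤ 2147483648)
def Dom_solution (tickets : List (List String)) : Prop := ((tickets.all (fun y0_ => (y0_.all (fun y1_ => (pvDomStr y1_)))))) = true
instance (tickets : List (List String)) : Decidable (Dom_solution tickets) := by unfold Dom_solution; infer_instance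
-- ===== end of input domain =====

-- B replaces A's explicit-stack Eulerian walk by the recursive Hierholzer (ascending adjacency
-- lists popped from the front, post-order append, reverse at the end); objective: alternative
-- decomposition, same exact return value. Neither version mutates its argument.

-- total length of the adjacency lists stored in a dict (termination measure for the walk)
def pvWt (ps : List (String × List String)) : Nat := (ps.map (fun p => p.2.length)).sum

-- ---- measure lemmas cited by the ports (termination / well-formedness only) ----

theorem pvWt_replace (k : String) (v : List String) :
    ∀ ps : List (String × List String), (ps.map Prod.fst).Nodup →
      ∀ w, ps.find? (fun p => p.1 == k) = some w →
      pvWt (ps.map (fun p => if p.1 == k then (k, v) else p)) + w.2.length = pvWt ps + v.length := by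
  intro ps
  induction ps with
  | nil => intro _ w hw; simp at hw
  | cons hd tl ih =>
    obtain ⟨a, b⟩ := hd
    intro hnd w hw
    simp only [List.map_cons, List.nodup_cons] at hnd
    obtain ⟨ha, htl⟩ := hnd
    by_cases hk : a = k
    · subst hk
      have hww : w = (a, b) := by
        rw [List.find?_cons] at hw
        simp at hw
        exact hw.symm
      subst hww
      have htail : tl.map (fun p => if p.1 == a then (a, v) else p) = tl := by
        have h1 : ∀ p ∈ tl, (fun p : String × List String => if p.1 == a then (a, v) else p) p = id p := by
          intro p hp
          have : p.1 ≠ a := fun he => ha (he ▸ List.mem_map_of_mem hp)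
          simp [this]
        rw [List.map_congr_left h1, List.map_id]
      simp only [List.map_cons, pvWt, List.sum_cons, htail]
      simp
      omega
    · have hw' : tl.find? (fun p => p.1 == k) = some w := by
        have hne : (a == k) = false := by simp [hk]
        rw [List.find?_cons, hne] at hw
        exact hw
      have hih := ih htl w hw'
      simp only [List.map_cons, pvWt, List.sum_cons] at hih ⊢
      simp only [show ((a, b).1 == k) = false by simp [hk], Bool.false_eq_true, if_false]
      omega

theorem pvGet?_find? (d : PySem.Dict String (List String)) (k : String) (v : List String)
    (h : d.get? k = some v) : d.items.find? (fun p => p.1 == k) = some (k, v) := by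
  unfold PySem.Dict.get? at h
  cases hf : d.items.find? (fun p => p.1 == k) with
  | none => rw [hf] at h; simp at h
  | some pr =>
    rw [hf] at h
    have h1 : pr.1 = k := by simpa using List.find?_some hf
    have h2 : pr.2 = v := by simpa using h
    congr 1
    exact Prod.ext_iff.mpr ⟨h1, h2⟩

theorem pvGet?_of_getD_ne (d : PySem.Dict String (List String)) (k : String)
    (h : d.getD k [] ≠ []) : d.get? k = some (d.getD k []) := by
  unfold PySem.Dict.getD at *
  cases hg : d.get? k with
  | none => rw [hg] at h; simp at h
  | some v => rfl

theorem pvContains_of_get? (d : PySem.Dict String (List String)) (k : String) (v : List String)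
    (h : d.get? k = some v) : d.contains k = true := by
  have hf := pvGet?_find? d k v h
  unfold PySem.Dict.contains
  exact List.any_eq_true.mpr ⟨(k, v), List.mem_of_find?_eq_some hf, by simp⟩

theorem pvWt_insert (d : PySem.Dict String (List String)) (hnd : d.keys.Nodup)
    (k : String) (v w : List String) (h : d.get? k = some w) :
    pvWt (d.insert k v).items + w.length = pvWt d.items + v.length := by
  have hc : d.contains k = true := pvContains_of_get? d k w h
  have hf := pvGet?_find? d k w h
  have hkeys : (d.items.map Prod.fst).Nodup := by
    simpa [PySem.Dict.keys] using hnd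
  have := pvWt_replace k v d.items hkeys (k, w) hf
  simpa [PySem.Dict.insert, hc] using this

theorem pvLen_le_wt (d : PySem.Dict String (List String)) (k : String) (w : List String)
    (h : d.get? k = some w) : w.length ≤ pvWt d.items := by
  have hf := pvGet?_find? d k w h
  have hm : (k, w) ∈ d.items := List.mem_of_find?_eq_some hf
  exact List.le_sum_of_mem (List.mem_map_of_mem hm)

theorem pvWt_pop_lt (d : PySem.Dict String (List String)) (hnd : d.keys.Nodup) (k : String)
    (h : d.getD k [] ≠ []) :
    pvWt (d.insert k (d.getD k []).dropLast).items < pvWt d.items := by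
  have hg := pvGet?_of_getD_ne d k h
  have h1 := pvWt_insert d hnd k (d.getD k []).dropLast (d.getD k []) hg
  have h2 := pvLen_le_wt d k (d.getD k []) hg
  have h3 : (d.getD k []).dropLast.length = (d.getD k []).length - 1 := by
    simp [List.length_dropLast]
  have h4 : 1 ≤ (d.getD k []).length := by
    cases hx : d.getD k [] with
    | nil => exact absurd hx h
    | cons a l => simp
  omega

-- ===== PORT A =====

-- one iteration of A's first loop ('for depart, arrival in tickets'; lists of length ≠ 2 are
-- outside Pre_solution, the '_' branch is never reached there)
def pvStepA (r : PySem.Dict String (List String)) (t : List String) :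
    PySem.Dict String (List String) :=
  match t with
  | [depart, arrival] =>
      if r.contains depart then r.insert depart (r.getD depart [] ++ [arrival])
      else r.insert depart [arrival]
  | _ => r

-- routes[route].sort(reverse=True)
def pvSortDesc (l : List String) : List String := PySem.List.sorted l (fun s => s) true

theorem pvNodup_foldA (tickets : List (List String)) :
    ∀ d : PySem.Dict String (List String), d.keys.Nodup →
      (tickets.foldl pvStepA d).keys.Nodup := by
  induction tickets with
  | nil => intro d hd; simpa using hd
  | cons t ts ih =>
    intro d hd
    apply ih
    unfold pvStepA
    match t with
    | [] => exact hd
    | [x] => exact hd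
    | x :: y :: z :: w => exact hd
    | [x, y] =>
      dsimp only
      split
      · exact PySem.Dict.nodup_keys_insert _ _ _ hd
      · exact PySem.Dict.nodup_keys_insert _ _ _ hd

theorem pvNodup_sortFold (sortF : List String → List String) (ks : List String) :
    ∀ d : PySem.Dict String (List String), d.keys.Nodup →
      (ks.foldl (fun acc k => acc.modify k [] sortF) d).keys.Nodup := by
  induction ks with
  | nil => intro d hd; simpa using hd
  | cons k ks ih =>
    intro d hd
    apply ih
    unfold PySem.Dict.modify
    exact PySem.Dict.nodup_keys_insert _ _ _ hd

-- the routes dict after A's two preparation loops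
def pvRoutesA (tickets : List (List String)) : PySem.Dict String (List String) :=
  (tickets.foldl pvStepA PySem.Dict.empty).keys.foldl
    (fun acc k => acc.modify k [] pvSortDesc) (tickets.foldl pvStepA PySem.Dict.empty)

theorem pvNodup_routesA (tickets : List (List String)) : (pvRoutesA tickets).keys.Nodup :=
  pvNodup_sortFold _ _ _ (pvNodup_foldA tickets _ PySem.Dict.nodup_keys_empty)

-- A's while loop: stack/path machine; routes[top].pop() pops the LAST element
def pvLoopA (r : PySem.Dict String (List String)) (hnd : r.keys.Nodup)
    (stack path : List String) : List String :=
  match stack with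
  | [] => path
  | top :: rest =>
    if h : r.getD top [] = [] then
      pvLoopA r hnd rest (path ++ [top])
    else
      pvLoopA (r.insert top (r.getD top []).dropLast)
        (PySem.Dict.nodup_keys_insert _ _ _ hnd)
        ((r.getD top []).getLast h :: top :: rest) path
termination_by (2 * pvWt r.items + stack.length, 0)
decreasing_by
  · simp only [List.length_cons]
    exact Prod.Lex.left _ _ (by omega)
  · exact Prod.Lex.left _ _ (by have := pvWt_pop_lt r hnd top h; simp only [List.length_cons]; omega)

def solution (tickets : List (List String)) : List String :=
  (pvLoopA (pvRoutesA tickets) (pvNodup_routesA tickets) ["ICN"] []).reverse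

-- ===== PORT B =====

-- routes[depart] = routes.get(depart, []) + [arrival]
def pvStepB (r : PySem.Dict String (List String)) (t : List String) :
    PySem.Dict String (List String) :=
  match t with
  | [depart, arrival] => r.insert depart (r.getD depart [] ++ [arrival])
  | _ => r

-- routes[k].sort()
def pvSortAsc (l : List String) : List String := PySem.List.sorted l (fun s => s) false

def pvRoutesB (tickets : List (List String)) : PySem.Dict String (List String) :=
  (tickets.foldl pvStepB PySem.Dict.empty).keys.foldl
    (fun acc k => acc.modify k [] pvSortAsc) (tickets.foldl pvStepB PySem.Dict.empty)

-- recursive visit; the dict and the path list are threaded instead of mutated.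
-- fuel is a totality guard only: tickets.length + 1 always suffices (each nested call
-- first removes one ticket from the dict), proved in the equivalence below.
def pvVisit : Nat → PySem.Dict String (List String) → List String → String →
    PySem.Dict String (List String) × List String
  | 0, r, path, _ => (r, path)
  | Nat.succ fuel, r, path, node =>
    if h : r.getD node [] = [] then (r, path ++ [node])
    else
      let p := pvVisit fuel (r.insert node (r.getD node []).tail) path ((r.getD node []).head h)
      pvVisit fuel p.1 p.2 node

def solution_alt (tickets : List (List String)) : List String :=
  ((pvVisit (tickets.length + 1) (pvRoutesB tickets) [] "ICN").2).reverse

-- ===== PRECONDITION & SPEC =====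

-- Pre_ excludes tickets that are not [depart, arrival] pairs: Python A raises ValueError
-- unpacking them (B raises identically).
def Pre_solution (tickets : List (List String)) : Prop := ∀ t ∈ tickets, t.length = 2
instance (tickets : List (List String)) : Decidable (Pre_solution tickets) := by
  unfold Pre_solution; infer_instance

def pvWitness_solution : List (List String) := [["ICN", "AAA"], ["AAA", "ICN"]]

def Spec_solution (tickets : List (List String)) (out : List String) : Prop := out = solution_alt tickets
instance (tickets : List (List String)) (out : List String) : Decidable (Spec_solution tickets out) := by unfold Spec_solution; infer_instance

-- ===== CLAIM (what is proved, stated in full; the proofs are below) =====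
def Claim_equal_solution : Prop := ∀ (tickets : List (List String)), Dom_solution tickets → Pre_solution tickets → Spec_solution tickets (solution tickets)

-- ===== LEMMAS AND PROOFS =====

-- unfold lemmas for the two loops
theorem pvLoopA_nil (r : PySem.Dict String (List String)) (hnd : r.keys.Nodup) (path : List String) :
    pvLoopA r hnd [] path = path := by rw [pvLoopA]

theorem pvLoopA_cons_nil (r : PySem.Dict String (List String)) (hnd : r.keys.Nodup)
    (top : String) (rest path : List String) (h : r.getD top [] = []) :
    pvLoopA r hnd (top :: rest) path = pvLoopA r hnd rest (path ++ [top]) := by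
  rw [pvLoopA]; simp [h]

theorem pvLoopA_cons_pop (r : PySem.Dict String (List String)) (hnd : r.keys.Nodup)
    (top : String) (rest path : List String) (h : r.getD top [] ≠ []) :
    pvLoopA r hnd (top :: rest) path =
      pvLoopA (r.insert top (r.getD top []).dropLast) (PySem.Dict.nodup_keys_insert _ _ _ hnd)
        ((r.getD top []).getLast h :: top :: rest) path := by
  rw [pvLoopA]; simp [h]

theorem pvVisit_succ_nil (n : Nat) (r : PySem.Dict String (List String)) (path : List String)
    (node : String) (h : r.getD node [] = []) :
    pvVisit (n + 1) r path node = (r, path ++ [node]) := by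
  rw [pvVisit]; simp [h]

theorem pvVisit_succ_pop (n : Nat) (r : PySem.Dict String (List String)) (path : List String)
    (node : String) (h : r.getD node [] ≠ []) :
    pvVisit (n + 1) r path node =
      pvVisit n (pvVisit n (r.insert node (r.getD node []).tail) path ((r.getD node []).head h)).1
        (pvVisit n (r.insert node (r.getD node []).tail) path ((r.getD node []).head h)).2 node := by
  rw [pvVisit]; simp [h]

-- sort(reverse=True) is the reverse of sort() on a list of plain strings
theorem pvRevSort (l : List String) : pvSortDesc l = (pvSortAsc l).reverse := by
  unfold pvSortDesc pvSortAsc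
  have hperm : (PySem.List.sorted l (fun s => s) true).Perm
      (PySem.List.sorted l (fun s => s) false).reverse :=
    ((PySem.List.sorted_perm l _ true).trans ((PySem.List.sorted_perm l _ false).symm)).trans
      (List.reverse_perm _).symm
  exact List.Perm.eq_of_pairwise (le := fun a b : String => b ≤ a)
    (fun a b _ _ h1 h2 => le_antisymm h2 h1)
    (PySem.List.sorted_pairwise_rev l (fun s => s))
    (List.pairwise_reverse.mpr (PySem.List.sorted_pairwise l (fun s => s))) hperm

-- both first loops build the same dict
theorem pvStepAB (d : PySem.Dict String (List String)) (t : List String) :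
    pvStepA d t = pvStepB d t := by
  unfold pvStepA pvStepB
  match t with
  | [] => rfl
  | [x] => rfl
  | x :: y :: z :: w => rfl
  | [x, y] =>
    dsimp only
    by_cases hc : d.contains x
    · simp [hc]
    · simp [hc, PySem.Dict.getD_of_not_contains d ([] : List String) (by simpa using hc)]

theorem pvFoldAB : ∀ (ts : List (List String)) (d : PySem.Dict String (List String)),
    ts.foldl pvStepA d = ts.foldl pvStepB d := by
  intro ts
  induction ts with
  | nil => intro d; rfl
  | cons t ts ih => intro d; simp only [List.foldl_cons, pvStepAB]; exact ih _

-- pointwise description of the sorting loop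
theorem pvSortfold_getD (sortF : List String → List String) :
    ∀ (ks : List String) (d : PySem.Dict String (List String)), ks.Nodup → ∀ key,
      ((ks.foldl (fun acc k => acc.modify k [] sortF) d).getD key []) =
        if key ∈ ks then sortF (d.getD key []) else d.getD key [] := by
  intro ks
  induction ks with
  | nil => intro d _ key; simp
  | cons k0 ks ih =>
    intro d hnd key
    rcases List.nodup_cons.mp hnd with ⟨hk0, hks⟩
    simp only [List.foldl_cons]
    rw [ih _ hks key]
    by_cases hmem : key ∈ ks
    · have hne : key ≠ k0 := fun he => hk0 (he ▸ hmem)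
      simp [hmem, hne, PySem.Dict.getD_modify]
    · by_cases heq : key = k0 <;> simp [hmem, heq, hk0, PySem.Dict.getD_modify]

theorem pvGet?_of_contains (d : PySem.Dict String (List String)) (k : String)
    (hc : d.contains k = true) : d.get? k = some (d.getD k []) := by
  rw [PySem.Dict.contains_eq_isSome_get?] at hc
  cases hg : d.get? k with
  | none => rw [hg] at hc; simp at hc
  | some v => simp [PySem.Dict.getD, hg]

-- the invariant relating A's dict to B's dict
theorem pvRel_routes (ts : List (List String)) :
    ∀ key, (pvRoutesA ts).getD key [] = ((pvRoutesB ts).getD key []).reverse := by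
  intro key
  unfold pvRoutesA pvRoutesB
  rw [pvFoldAB]
  have hnd : (ts.foldl pvStepB PySem.Dict.empty).keys.Nodup := by
    rw [← pvFoldAB]; exact pvNodup_foldA ts _ PySem.Dict.nodup_keys_empty
  rw [pvSortfold_getD pvSortDesc _ _ hnd key, pvSortfold_getD pvSortAsc _ _ hnd key]
  by_cases hmem : key ∈ (ts.foldl pvStepB PySem.Dict.empty).keys
  · simp [hmem, pvRevSort]
  · have hc : (ts.foldl pvStepB PySem.Dict.empty).contains key = false := by
      cases hx : (ts.foldl pvStepB PySem.Dict.empty).contains key with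
      | false => rfl
      | true => exact absurd ((PySem.Dict.contains_iff_mem_keys _ key).mp hx) hmem
    simp [hmem, PySem.Dict.getD_of_not_contains _ ([] : List String) hc]

-- weight bookkeeping for B's dict
theorem pvWt_insert_new (d : PySem.Dict String (List String)) (k : String) (v : List String)
    (hc : d.contains k = false) :
    pvWt (d.insert k v).items = pvWt d.items + v.length := by
  simp [PySem.Dict.insert, hc, pvWt]

theorem pvNodup_foldB (ts : List (List String)) (d : PySem.Dict String (List String))
    (hd : d.keys.Nodup) : (ts.foldl pvStepB d).keys.Nodup := by
  rw [← pvFoldAB]; exact pvNodup_foldA ts d hd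

theorem pvNodup_stepB (d : PySem.Dict String (List String)) (t : List String)
    (hd : d.keys.Nodup) : (pvStepB d t).keys.Nodup := by
  unfold pvStepB
  match t with
  | [] => exact hd
  | [x] => exact hd
  | x :: y :: z :: w => exact hd
  | [x, y] => exact PySem.Dict.nodup_keys_insert _ _ _ hd

theorem pvWt_stepB_le (d : PySem.Dict String (List String)) (t : List String)
    (hd : d.keys.Nodup) : pvWt (pvStepB d t).items ≤ pvWt d.items + 1 := by
  unfold pvStepB
  match t with
  | [] => exact Nat.le_succ _
  | [x] => exact Nat.le_succ _
  | x :: y :: z :: w => exact Nat.le_succ _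
  | [x, y] =>
    dsimp only
    by_cases hc : d.contains x
    · have hg := pvGet?_of_contains d x hc
      have := pvWt_insert d hd x (d.getD x [] ++ [y]) (d.getD x []) hg
      simp only [List.length_append, List.length_cons, List.length_nil] at this
      omega
    · have hc' : d.contains x = false := by simpa using hc
      rw [pvWt_insert_new d x _ hc']
      rw [PySem.Dict.getD_of_not_contains d ([] : List String) hc']
      simp

theorem pvWt_foldB_le (ts : List (List String)) :
    ∀ d : PySem.Dict String (List String), d.keys.Nodup →
      pvWt ((ts.foldl pvStepB d).items) ≤ pvWt d.items + ts.length := by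
  induction ts with
  | nil => intro d _; simp
  | cons t ts ih =>
    intro d hd
    have h1 := pvWt_stepB_le d t hd
    have h2 := ih (pvStepB d t) (pvNodup_stepB d t hd)
    simp only [List.foldl_cons, List.length_cons]
    omega

theorem pvWt_sortfold_le (sortF : List String → List String)
    (hlen : ∀ l, (sortF l).length = l.length) :
    ∀ (ks : List String) (d : PySem.Dict String (List String)), d.keys.Nodup →
      pvWt ((ks.foldl (fun acc k => acc.modify k [] sortF) d).items) ≤ pvWt d.items := by
  intro ks
  induction ks with
  | nil => intro d _; simp
  | cons k0 ks ih =>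
    intro d hd
    simp only [List.foldl_cons]
    have hstep : pvWt ((d.modify k0 [] sortF).items) ≤ pvWt d.items := by
      unfold PySem.Dict.modify
      by_cases hc : d.contains k0
      · have hg := pvGet?_of_contains d k0 hc
        have := pvWt_insert d hd k0 (sortF (d.getD k0 [])) (d.getD k0 []) hg
        rw [hlen] at this
        omega
      · have hc' : d.contains k0 = false := by simpa using hc
        rw [pvWt_insert_new d k0 _ hc']
        rw [PySem.Dict.getD_of_not_contains d ([] : List String) hc', hlen]
        simp
    have hnd' : (d.modify k0 [] sortF).keys.Nodup := by
      unfold PySem.Dict.modify; exact PySem.Dict.nodup_keys_insert _ _ _ hd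
    exact le_trans (ih _ hnd') hstep

theorem pvWt_empty : pvWt (PySem.Dict.empty : PySem.Dict String (List String)).items = 0 := by
  simp [PySem.Dict.empty, pvWt]

theorem pvWt_routesB (ts : List (List String)) : pvWt (pvRoutesB ts).items ≤ ts.length := by
  unfold pvRoutesB
  have h1 := pvWt_foldB_le ts PySem.Dict.empty PySem.Dict.nodup_keys_empty
  have h2 := pvWt_sortfold_le pvSortAsc (fun l => PySem.List.length_sorted l _ false)
    (ts.foldl pvStepB PySem.Dict.empty).keys _
    (pvNodup_foldB ts _ PySem.Dict.nodup_keys_empty)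
  rw [pvWt_empty] at h1
  omega

theorem pvNodup_routesB (ts : List (List String)) : (pvRoutesB ts).keys.Nodup := by
  unfold pvRoutesB
  exact pvNodup_sortFold _ _ _ (pvNodup_foldB ts _ PySem.Dict.nodup_keys_empty)

-- the simulation: one recursive visit of B corresponds to running A's stack machine
-- until the node below is exposed again
theorem pvSim : ∀ (fuel : Nat) (rB : PySem.Dict String (List String)),
    rB.keys.Nodup → pvWt rB.items < fuel →
    ∀ (rA : PySem.Dict String (List String)) (hA : rA.keys.Nodup),
    (∀ k, rA.getD k [] = (rB.getD k []).reverse) →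
    ∀ (node : String) (path stack : List String),
    ∃ (rA' : PySem.Dict String (List String)) (hA' : rA'.keys.Nodup),
      (∀ k, rA'.getD k [] = ((pvVisit fuel rB path node).1.getD k []).reverse) ∧
      (pvVisit fuel rB path node).1.keys.Nodup ∧
      pvWt (pvVisit fuel rB path node).1.items ≤ pvWt rB.items ∧
      pvLoopA rA hA (node :: stack) path = pvLoopA rA' hA' stack (pvVisit fuel rB path node).2 := by
  intro fuel
  induction fuel with
  | zero => intro rB _ hw; exact absurd hw (by omega)
  | succ n ih =>
    intro rB hndB hw rA hA hrel node path stack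
    by_cases h : rB.getD node [] = []
    · rw [pvVisit_succ_nil n rB path node h]
      have hAe : rA.getD node [] = [] := by rw [hrel node, h]; rfl
      exact ⟨rA, hA, hrel, hndB, le_refl _, pvLoopA_cons_nil rA hA node stack path hAe⟩
    · rw [pvVisit_succ_pop n rB path node h]
      have hget : rB.get? node = some (rB.getD node []) := pvGet?_of_getD_ne rB node h
      have hlen1 : 1 ≤ (rB.getD node []).length := List.length_pos_iff.mpr h
      have hwle := pvLen_le_wt rB node _ hget
      have hwB1 := pvWt_insert rB hndB node (rB.getD node []).tail (rB.getD node []) hget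
      have htl : (rB.getD node []).tail.length = (rB.getD node []).length - 1 := List.length_tail
      have hndB1 : (rB.insert node (rB.getD node []).tail).keys.Nodup :=
        PySem.Dict.nodup_keys_insert _ _ _ hndB
      have hAe : rA.getD node [] = (rB.getD node []).reverse := hrel node
      have hAne : rA.getD node [] ≠ [] := by
        rw [hAe]; simpa using h
      -- A pops the last element of the reverse-sorted list = B's head
      have hpop : (rA.getD node []).getLast hAne = (rB.getD node []).head h := by
        simp only [hAe]
        exact List.getLast_reverse _
      have hdrop : (rA.getD node []).dropLast = (rB.getD node []).tail.reverse := by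
        rw [hAe, List.dropLast_reverse]
      have hrel1 : ∀ k, (rA.insert node (rB.getD node []).tail.reverse).getD k [] =
          ((rB.insert node (rB.getD node []).tail).getD k []).reverse := by
        intro k
        rw [PySem.Dict.getD_insert, PySem.Dict.getD_insert]
        by_cases hk : k = node
        · simp [hk]
        · simp [hk, hrel k]
      obtain ⟨rA2, hA2, hrel2, hnd2, hwt2, heq1⟩ :=
        ih (rB.insert node (rB.getD node []).tail) hndB1 (by omega)
          (rA.insert node (rB.getD node []).tail.reverse)
          (PySem.Dict.nodup_keys_insert _ _ _ hA) hrel1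
          ((rB.getD node []).head h) path (node :: stack)
      obtain ⟨rA3, hA3, hrel3, hnd3, hwt3, heq2⟩ :=
        ih (pvVisit n (rB.insert node (rB.getD node []).tail) path ((rB.getD node []).head h)).1
          hnd2 (by omega) rA2 hA2 hrel2 node
          (pvVisit n (rB.insert node (rB.getD node []).tail) path ((rB.getD node []).head h)).2
          stack
      refine ⟨rA3, hA3, hrel3, hnd3, by omega, ?_⟩
      rw [pvLoopA_cons_pop rA hA node stack path hAne, hpop, hdrop, heq1, heq2]

-- ===== VERDICT (by name: the statement is the Claim_ definition above) =====
theorem solution_spec : Claim_equal_solution := by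
  intro tickets _ _
  unfold Spec_solution solution solution_alt
  obtain ⟨rA', hA', _, _, _, heq⟩ :=
    pvSim (tickets.length + 1) (pvRoutesB tickets) (pvNodup_routesB tickets)
      (Nat.lt_succ_of_le (pvWt_routesB tickets)) (pvRoutesA tickets) (pvNodup_routesA tickets)
      (pvRel_routes tickets) "ICN" [] []
  rw [heq, pvLoopA_nil]
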